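-- pv_equiv track=rewrite | github.com/KoheiAsano/asako-atcoder-problems | problems/AOJ/2014.py | which
-- ===== SOURCE A (Python) =====
-- from collections import deque
--
-- dxy = [[0, 1], [1, 0], [-1, 0], [0, -1]]
--
-- def which(x, y, map):
--     if(map[x][y] != "."):
--         return (True, 0)
--     else:
--         Q = deque()
--         W, H = len(map[0]), len(map)
--         map[x][y] = "#"
--         Q.append((x, y))
--         Black, White = False, False
--         res = 1
--         while(len(Q) != 0):
--             now = Q.popleft()
--             for d in dxy:
--                 tx, ty = now[0]+d[0], now[1]+d[1]
--                 # 色判定もする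
--                 if 0 <= tx <= H-1 and 0 <= ty <= W-1:
--                     if map[tx][ty] == ".":
--                         map[tx][ty] = "#"
--                         res += 1
--                         Q.append((tx, ty))
--                     elif map[tx][ty] == "B":
--                         Black = True
--                     elif map[tx][ty] == "W":
--                         White = True
--     # 黒かどうかと、レス、無効ならTrue 0
--     return (Black, res) if Black ^ White else (True, 0)
-- ===== SOURCE B (Python) =====
-- from collections import deque
--
-- dxy = [[0, 1], [1, 0], [-1, 0], [0, -1]]
--
-- def which(x, y, map):
--     # Decoupled version: flood fill only marks and collects the region; a second
--     # pass over the collected cells reads neighbor colors from the final grid.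
--     # Same in-place marking of `map` as the original.
--     if map[x][y] != ".":
--         return (True, 0)
--     H = len(map)
--     W = len(map[0])
--     map[x][y] = "#"
--     Q = deque([(x, y)])
--     region = [(x, y)]
--     while Q:
--         cx, cy = Q.popleft()
--         for dx, dy in dxy:
--             tx, ty = cx + dx, cy + dy
--             if 0 <= tx < H and 0 <= ty < W and map[tx][ty] == ".":
--                 map[tx][ty] = "#"
--                 region.append((tx, ty))
--                 Q.append((tx, ty))
--     black = white = False
--     for cx, cy in region:
--         for dx, dy in dxy:
--             tx, ty = cx + dx, cy + dy
--             if 0 <= tx < H and 0 <= ty < W: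
--                 if map[tx][ty] == "B":
--                     black = True
--                 elif map[tx][ty] == "W":
--                     white = True
--     return (black, len(region)) if black != white else (True, 0)
-- ===== Notes on version B (the rewrite author's own statement) =====
-- stated objective: alternative
-- what changed: A fuses colour detection into the BFS flood fill with running Black/White flags and a counter; B decouples them: the fill only marks and collects the region cells, then a separate second pass over the collected cells reads each cell's four in-bounds neighbours from the final grid to set black/white, and the size is len(region).
-- outside the precondition, e.g. on which(0, 0, [['.', 'B'], ['W']]): A returns (True, 0), B returns (True, 0); on which(1, 1, [['B'], ['.', '.']]): A returns (True, 2), B returns (True, 2)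
import Mathlib
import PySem

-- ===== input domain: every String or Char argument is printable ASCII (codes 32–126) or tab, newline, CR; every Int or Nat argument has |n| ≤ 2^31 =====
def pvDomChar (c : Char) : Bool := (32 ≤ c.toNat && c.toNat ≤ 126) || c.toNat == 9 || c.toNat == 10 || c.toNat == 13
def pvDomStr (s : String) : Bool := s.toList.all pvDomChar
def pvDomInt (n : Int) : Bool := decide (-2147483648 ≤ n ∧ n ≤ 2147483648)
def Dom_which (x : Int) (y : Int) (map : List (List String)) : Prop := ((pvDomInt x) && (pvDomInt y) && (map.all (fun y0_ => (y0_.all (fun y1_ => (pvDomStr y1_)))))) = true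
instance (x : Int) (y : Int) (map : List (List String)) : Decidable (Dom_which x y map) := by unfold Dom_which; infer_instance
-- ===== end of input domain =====

-- B decouples A's fused BFS: the flood fill only marks and collects the region, and a separate
-- second pass over the collected cells reads neighbor colors from the final grid (objective:
-- alternative decomposition, same cost). Both Pythons mutate `map` in place identically
-- (marking the region '#'); the equivalence proved here is about the return value.

-- ===== PORT A =====
-- shared cell primitives: Python's  g[i][j]  read (default when out of range) and  g[i][j] = v
def cellGet (g : List (List String)) (i j : Int) : String :=
  PySem.List.pyGetD (PySem.List.pyGetD g i []) j ""

def setCell (g : List (List String)) (i j : Int) (v : String) : List (List String) :=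
  PySem.List.pySetD g i (PySem.List.pySetD (PySem.List.pyGetD g i []) j v)

def dxy : List (Int × Int) := [(0, 1), (1, 0), (-1, 0), (0, -1)]

structure StA where
  g : List (List String)
  q : List (Int × Int)
  bl : Bool
  wh : Bool
  res : Int
deriving Repr, DecidableEq

-- one direction of A's inner `for d in dxy` (colour checks fused into the fill)
def stepA (H W : Int) (now : Int × Int) (st : StA) (d : Int × Int) : StA :=
  let tx := now.1 + d.1
  let ty := now.2 + d.2
  if 0 ≤ tx ∧ tx ≤ H - 1 ∧ 0 ≤ ty ∧ ty ≤ W - 1 then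
    let v := cellGet st.g tx ty
    if v = "." then ⟨setCell st.g tx ty "#", st.q ++ [(tx, ty)], st.bl, st.wh, st.res + 1⟩
    else if v = "B" then ⟨st.g, st.q, true, st.wh, st.res⟩
    else if v = "W" then ⟨st.g, st.q, st.bl, true, st.res⟩
    else st
  else st

-- A's `while len(Q) != 0`; the fuel only makes the recursion structural (shown sufficient below)
def loopA (fuel : Nat) (H W : Int) (st : StA) : Bool × Bool × Int :=
  match st.q with
  | [] => (st.bl, st.wh, st.res)
  | now :: rest =>
    match fuel with
    | 0 => (st.bl, st.wh, st.res)
    | f + 1 => loopA f H W (dxy.foldl (stepA H W now) ⟨st.g, rest, st.bl, st.wh, st.res⟩)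

def which (x : Int) (y : Int) (map : List (List String)) : Bool × Int :=
  if cellGet map x y ≠ "." then (true, 0)
  else
    let W : Int := ((map.headD []).length : Int)
    let H : Int := (map.length : Int)
    let g0 := setCell map x y "#"
    let out := loopA (5 * (map.map List.length).sum + 2) H W ⟨g0, [(x, y)], false, false, 1⟩
    if out.1 ≠ out.2.1 then (out.1, out.2.2) else (true, 0)

-- ===== PORT B =====
structure StB where
  g : List (List String)
  q : List (Int × Int)
  reg : List (Int × Int)
deriving Repr, DecidableEq

-- one direction of B's fill: pure flood fill, no colour logic
def stepB (H W : Int) (now : Int × Int) (st : StB) (d : Int × Int) : StB :=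
  let tx := now.1 + d.1
  let ty := now.2 + d.2
  if 0 ≤ tx ∧ tx < H ∧ 0 ≤ ty ∧ ty < W ∧ cellGet st.g tx ty = "." then
    ⟨setCell st.g tx ty "#", st.q ++ [(tx, ty)], st.reg ++ [(tx, ty)]⟩
  else st

def loopB (fuel : Nat) (H W : Int) (st : StB) : List (List String) × List (Int × Int) :=
  match st.q with
  | [] => (st.g, st.reg)
  | now :: rest =>
    match fuel with
    | 0 => (st.g, st.reg)
    | f + 1 => loopB f H W (dxy.foldl (stepB H W now) ⟨st.g, rest, st.reg⟩)

-- one direction of B's second pass: read one neighbour's colour from the final grid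
def colorUpd (H W : Int) (g : List (List String)) (c : Int × Int) (bw : Bool × Bool) (d : Int × Int) : Bool × Bool :=
  let tx := c.1 + d.1
  let ty := c.2 + d.2
  if 0 ≤ tx ∧ tx < H ∧ 0 ≤ ty ∧ ty < W then
    let v := cellGet g tx ty
    if v = "B" then (true, bw.2)
    else if v = "W" then (bw.1, true)
    else bw
  else bw

def colorStep (H W : Int) (g : List (List String)) (bw : Bool × Bool) (c : Int × Int) : Bool × Bool :=
  dxy.foldl (colorUpd H W g c) bw

def which_alt (x : Int) (y : Int) (map : List (List String)) : Bool × Int :=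
  if cellGet map x y ≠ "." then (true, 0)
  else
    let H : Int := (map.length : Int)
    let W : Int := ((map.headD []).length : Int)
    let g0 := setCell map x y "#"
    let p := loopB (5 * (map.map List.length).sum + 2) H W ⟨g0, [(x, y)], [(x, y)]⟩
    let bw := p.2.foldl (colorStep H W p.1) (false, false)
    if bw.1 ≠ bw.2 then (bw.1, (p.2.length : Int)) else (true, 0)

-- ===== PRECONDITION & SPEC =====
-- Pre_: where Python A returns without an exception, up to one closed-form narrowing:
-- when the start cell is '.', Pre_ requires every row to be at least as long as row 0 and the
-- start column to lie within row 0's width, because shorter rows raise IndexError depending on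
-- BFS reachability; a few ragged maps on which A happens to return are therefore excluded.
def Pre_which (x : Int) (y : Int) (map : List (List String)) : Prop :=
  (0 ≤ x + (map.length : Int) ∧ x < (map.length : Int)) ∧
  (0 ≤ y + ((PySem.List.pyGetD map x []).length : Int) ∧ y < ((PySem.List.pyGetD map x []).length : Int)) ∧
  (PySem.List.pyGet? (PySem.List.pyGetD map x []) y ≠ some "." ∨
    (0 ≤ y + ((map.headD []).length : Int) ∧ y < ((map.headD []).length : Int) ∧
      ∀ r ∈ map, (map.headD []).length ≤ r.length))
instance (x : Int) (y : Int) (map : List (List String)) : Decidable (Pre_which x y map) := by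
  unfold Pre_which; infer_instance

def pvWitness_which : Int × Int × List (List String) := (0, 0, [[".", "B"]])

def Spec_which (x : Int) (y : Int) (map : List (List String)) (out : Bool × Int) : Prop := out = which_alt x y map
instance (x : Int) (y : Int) (map : List (List String)) (out : Bool × Int) : Decidable (Spec_which x y map out) := by unfold Spec_which; infer_instance

-- ===== CLAIM (what is proved, stated in full; the proofs are below) =====
def Claim_equal_which : Prop := ∀ (x : Int) (y : Int) (map : List (List String)), Dom_which x y map → Pre_which x y map → Spec_which x y map (which x y map)

-- ===== LEMMAS AND PROOFS =====

lemma pyIdx_lt {n : Nat} {i : Int} {k : Nat} (h : PySem.List.pyIdx? n i = some k) : k < n := by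
  unfold PySem.List.pyIdx? at h
  split_ifs at h <;> simp_all <;> omega

lemma pyGetD_of_idx {α : Type} {xs : List α} {i : Int} {k : Nat} (d : α)
    (h : PySem.List.pyIdx? xs.length i = some k) :
    PySem.List.pyGetD xs i d = xs[k]'(pyIdx_lt h) := by
  have hk := pyIdx_lt h
  simp [PySem.List.pyGetD, PySem.List.pyGet?, h, List.getElem?_eq_getElem hk]

lemma pyGetD_of_idx_none {α : Type} {xs : List α} {i : Int} (d : α)
    (h : PySem.List.pyIdx? xs.length i = none) :
    PySem.List.pyGetD xs i d = d := by
  simp [PySem.List.pyGetD, PySem.List.pyGet?, h]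

lemma pyIdx_nonneg_lt {n : Nat} {i : Int} (hi : 0 ≤ i) (h : i.toNat < n) :
    PySem.List.pyIdx? n i = some i.toNat := by
  unfold PySem.List.pyIdx?
  split_ifs <;> simp_all

lemma valid_of_dot {g : List (List String)} {i j : Int} (hi : 0 ≤ i) (hj : 0 ≤ j)
    (h : cellGet g i j = ".") :
    ∃ (hig : i.toNat < g.length), j.toNat < (g[i.toNat]).length := by
  rcases ho : PySem.List.pyIdx? g.length i with _ | k
  · rw [cellGet, pyGetD_of_idx_none _ ho] at h
    rcases ho2 : PySem.List.pyIdx? (0:Nat) j with _ | m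
    · rw [show (0:Nat) = ([] : List String).length from rfl] at ho2
      rw [pyGetD_of_idx_none _ ho2] at h; simp at h
    · exact absurd (pyIdx_lt ho2) (by omega)
  · have hk := pyIdx_lt ho
    have hkk : k = i.toNat := by
      unfold PySem.List.pyIdx? at ho; split_ifs at ho; simp_all
    subst hkk
    refine ⟨hk, ?_⟩
    rw [cellGet, pyGetD_of_idx _ ho] at h
    rcases ho2 : PySem.List.pyIdx? (g[i.toNat]).length j with _ | m
    · rw [pyGetD_of_idx_none _ ho2] at h; simp at h
    · have hm := pyIdx_lt ho2
      have : m = j.toNat := by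
        unfold PySem.List.pyIdx? at ho2; split_ifs at ho2; simp_all
      omega

lemma setCell_eq {g : List (List String)} {i j : Int} (hi : 0 ≤ i) (hj : 0 ≤ j)
    (hig : i.toNat < g.length) (hjg : j.toNat < (g[i.toNat]).length) (v : String) :
    setCell g i j v = g.set i.toNat ((g[i.toNat]).set j.toNat v) := by
  have h1 : PySem.List.pyIdx? g.length i = some i.toNat := pyIdx_nonneg_lt hi hig
  have h2 : PySem.List.pyIdx? (g[i.toNat]).length j = some j.toNat := pyIdx_nonneg_lt hj hjg
  rw [setCell, pyGetD_of_idx _ h1]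
  simp [PySem.List.pySetD, PySem.List.pySet?, h1, h2]

lemma cellGet_setCell_char (g : List (List String)) (i j : Int) (hi : 0 ≤ i) (hj : 0 ≤ j)
    (hig : i.toNat < g.length) (hjg : j.toNat < (g[i.toNat]).length) (v : String) (p q : Int) :
    cellGet (setCell g i j v) p q =
      if PySem.List.pyIdx? g.length p = some i.toNat ∧
         PySem.List.pyIdx? (g[i.toNat]).length q = some j.toNat then v else cellGet g p q := by
  rw [setCell_eq hi hj hig hjg]
  rcases ho : PySem.List.pyIdx? g.length p with _ | k
  · rw [if_neg (by simp)]
    rw [cellGet, cellGet, pyGetD_of_idx_none _ ho,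
      pyGetD_of_idx_none (xs := g.set i.toNat ((g[i.toNat]).set j.toNat v)) _
        (by rw [List.length_set]; exact ho)]
  · have hop : PySem.List.pyIdx? (g.set i.toNat ((g[i.toNat]).set j.toNat v)).length p = some k := by
      rw [List.length_set]; exact ho
    have hk := pyIdx_lt ho
    rw [cellGet, cellGet, pyGetD_of_idx _ ho, pyGetD_of_idx _ hop]
    by_cases hkn : k = i.toNat
    · have hset : (g.set i.toNat ((g[i.toNat]).set j.toNat v))[k]'(by simpa using hk)
          = (g[i.toNat]).set j.toNat v := by
        subst hkn; exact List.getElem_set_self _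
      rw [hset]
      have hgk : g[k]'hk = g[i.toNat] := by subst hkn; rfl
      rw [hgk]
      rcases ho2 : PySem.List.pyIdx? (g[i.toNat]).length q with _ | m
      · rw [if_neg (by simp)]
        rw [pyGetD_of_idx_none (xs := (g[i.toNat]).set j.toNat v) _
          (by rw [List.length_set]; exact ho2), pyGetD_of_idx_none _ ho2]
      · have hoq : PySem.List.pyIdx? ((g[i.toNat]).set j.toNat v).length q = some m := by
          rw [List.length_set]; exact ho2
        have hm := pyIdx_lt ho2
        rw [pyGetD_of_idx _ hoq, pyGetD_of_idx _ ho2]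
        by_cases hmj : m = j.toNat
        · subst hmj
          rw [List.getElem_set_self, if_pos ⟨by rw [hkn], rfl⟩]
        · rw [List.getElem_set_ne (by omega), if_neg (by simp [hmj])]
    · have hset : (g.set i.toNat ((g[i.toNat]).set j.toNat v))[k]'(by simpa using hk)
          = g[k]'hk := List.getElem_set_ne (by omega) _
      rw [hset, if_neg (by simp [hkn])]

lemma cellGet_alias (g : List (List String)) {p q : Int} {n m : Nat}
    (hp : PySem.List.pyIdx? g.length p = some n)
    (hq : PySem.List.pyIdx? (g[n]'(pyIdx_lt hp)).length q = some m) :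
    cellGet g p q = (g[n]'(pyIdx_lt hp))[m]'(pyIdx_lt hq) := by
  rw [cellGet, pyGetD_of_idx _ hp, pyGetD_of_idx _ hq]

lemma stab_set' {g : List (List String)} {i j : Int} (hi : 0 ≤ i) (hj : 0 ≤ j)
    (h : cellGet g i j = ".") (p q : Int)
    (hne : cellGet (setCell g i j "#") p q ≠ cellGet g p q) :
    cellGet g p q = "." ∧ cellGet (setCell g i j "#") p q = "#" := by
  obtain ⟨hig, hjg⟩ := valid_of_dot hi hj h
  rw [cellGet_setCell_char g i j hi hj hig hjg "#" p q] at hne ⊢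
  split_ifs at hne ⊢ with hc
  · obtain ⟨hp, hq⟩ := hc
    have := cellGet_alias g hp hq
    have h0 := cellGet_alias g (pyIdx_nonneg_lt hi hig) (pyIdx_nonneg_lt hj hjg)
    rw [h0] at h
    exact ⟨by rw [this]; exact h, rfl⟩
  · exact absurd rfl hne

def stab (g g' : List (List String)) : Prop :=
  ∀ p q : Int, cellGet g' p q ≠ cellGet g p q → (cellGet g p q = "." ∧ cellGet g' p q = "#")

lemma stab_refl (g : List (List String)) : stab g g := by
  intro p q h; exact absurd rfl h

lemma stab_trans {g1 g2 g3 : List (List String)} (h12 : stab g1 g2) (h23 : stab g2 g3) :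
    stab g1 g3 := by
  intro p q h
  by_cases h2 : cellGet g2 p q = cellGet g1 p q
  · have := h23 p q (by rw [h2]; exact h)
    exact ⟨h2 ▸ this.1, this.2⟩
  · obtain ⟨ha, hb⟩ := h12 p q h2
    by_cases h3 : cellGet g3 p q = cellGet g2 p q
    · exact ⟨ha, h3 ▸ hb⟩
    · obtain ⟨hc, hd⟩ := h23 p q h3
      rw [hb] at hc; simp at hc

lemma stab_val {g g' : List (List String)} (h : stab g g') {p q : Int}
    (hv : cellGet g p q ≠ ".") : cellGet g' p q = cellGet g p q := by
  by_contra hne; exact hv (h p q hne).1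

lemma stab_set {g : List (List String)} {i j : Int} (hi : 0 ≤ i) (hj : 0 ≤ j)
    (h : cellGet g i j = ".") : stab g (setCell g i j "#") :=
  fun p q hne => stab_set' hi hj h p q hne

lemma cellGet_setCell_self {g : List (List String)} {i j : Int} (hi : 0 ≤ i) (hj : 0 ≤ j)
    (h : cellGet g i j = ".") (v : String) : cellGet (setCell g i j v) i j = v := by
  obtain ⟨hig, hjg⟩ := valid_of_dot hi hj h
  rw [cellGet_setCell_char g i j hi hj hig hjg v i j,
    if_pos ⟨pyIdx_nonneg_lt hi hig, pyIdx_nonneg_lt hj hjg⟩]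


-- number of "." cells: the loop measure
def dots (g : List (List String)) : Nat :=
  (g.map (fun r => r.countP (fun s => s == "."))).sum

lemma sum_map_set {α : Type} (f : α → Nat) : ∀ (l : List α) (n : Nat) (a : α) (h : n < l.length),
    ((l.set n a).map f).sum + f (l[n]'h) = (l.map f).sum + f a
  | x :: xs, 0, a, _ => by simp; omega
  | x :: xs, n + 1, a, h => by
    simp only [List.set_cons_succ, List.map_cons, List.sum_cons, List.getElem_cons_succ]
    have := sum_map_set f xs n a (by simpa using h)
    omega

lemma countP_set_dot : ∀ (r : List String) (m : Nat) (h : m < r.length), r[m]'h = "." →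
    (r.set m "#").countP (fun s => s == ".") + 1 = r.countP (fun s => s == ".")
  | x :: xs, 0, _, hx => by simp_all
  | x :: xs, m + 1, h, hx => by
    simp only [List.set_cons_succ, List.countP_cons, List.getElem_cons_succ] at *
    have := countP_set_dot xs m (by simpa using h) hx
    omega

lemma dots_set {g : List (List String)} {i j : Int} (hi : 0 ≤ i) (hj : 0 ≤ j)
    (h : cellGet g i j = ".") : dots (setCell g i j "#") + 1 = dots g := by
  obtain ⟨hig, hjg⟩ := valid_of_dot hi hj h
  rw [setCell_eq hi hj hig hjg]
  have hcell : (g[i.toNat])[j.toNat] = "." := by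
    rw [← cellGet_alias g (pyIdx_nonneg_lt hi hig) (pyIdx_nonneg_lt hj hjg)]; exact h
  have h1 := sum_map_set (fun r => r.countP (fun s => s == ".")) g i.toNat
    ((g[i.toNat]).set j.toNat "#") hig
  have h2 := countP_set_dot (g[i.toNat]) j.toNat hjg hcell
  unfold dots
  omega

lemma dots_le (g : List (List String)) : dots g ≤ (g.map List.length).sum := by
  unfold dots
  induction g with
  | nil => simp
  | cons r t ih =>
    simp only [List.map_cons, List.sum_cons]
    exact Nat.add_le_add List.countP_le_length ih

lemma totalLen_setCell (g : List (List String)) (i j : Int) (v : String) :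
    ((setCell g i j v).map List.length).sum = (g.map List.length).sum := by
  rw [setCell, PySem.List.pySetD, PySem.List.pySet?]
  rcases ho : PySem.List.pyIdx? g.length i with _ | k
  · simp
  · have hk := pyIdx_lt ho
    have hrow : PySem.List.pyGetD g i [] = g[k] := pyGetD_of_idx _ ho
    simp only [Option.map_some, Option.getD_some]
    have := sum_map_set List.length g k (PySem.List.pySetD (PySem.List.pyGetD g i []) j v) hk
    have hlen : (PySem.List.pySetD (PySem.List.pyGetD g i []) j v).length = (g[k]).length := by
      rw [hrow, PySem.List.pySetD, PySem.List.pySet?]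
      rcases ho2 : PySem.List.pyIdx? (g[k]).length j with _ | m <;> simp
    omega


-- one BFS round: from the same state, B's fold reaches the same grid and queue as A's, and A's
-- colour flags advance by exactly B's second-pass update at `now`, read against any grid
-- downstream of the fold's final grid (only '.' cells ever change, so colours are stable).
lemma fold_sync (H W : Int) (now : Int × Int) :
    ∀ (ds : List (Int × Int)) (g : List (List String)) (q : List (Int × Int)) (bl wh : Bool)
      (res : Int) (reg : List (Int × Int)),
    ∃ G add,
      ds.foldl (stepB H W now) ⟨g, q, reg⟩ = ⟨G, q ++ add, reg ++ add⟩ ∧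
      stab g G ∧
      dots G + add.length = dots g ∧
      ∀ gf, stab G gf →
        ds.foldl (stepA H W now) ⟨g, q, bl, wh, res⟩ =
          ⟨G, q ++ add, (ds.foldl (colorUpd H W gf now) (bl, wh)).1,
            (ds.foldl (colorUpd H W gf now) (bl, wh)).2, res + add.length⟩ := by
  intro ds
  induction ds with
  | nil =>
    intro g q bl wh res reg
    exact ⟨g, [], by simp, stab_refl g, by simp, fun gf _ => by simp⟩
  | cons d ds ih =>
    intro g q bl wh res reg
    simp only [List.foldl_cons]
    by_cases hr : 0 ≤ now.1 + d.1 ∧ now.1 + d.1 < H ∧ 0 ≤ now.2 + d.2 ∧ now.2 + d.2 < W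
    · by_cases hv : cellGet g (now.1 + d.1) (now.2 + d.2) = "."
      · -- neighbour is '.', both fills mark it
        have hB : stepB H W now ⟨g, q, reg⟩ d =
            ⟨setCell g (now.1 + d.1) (now.2 + d.2) "#",
             q ++ [(now.1 + d.1, now.2 + d.2)], reg ++ [(now.1 + d.1, now.2 + d.2)]⟩ := by
          simp only [stepB]
          rw [if_pos ⟨hr.1, hr.2.1, hr.2.2.1, hr.2.2.2, hv⟩]
        have hA : stepA H W now ⟨g, q, bl, wh, res⟩ d =
            ⟨setCell g (now.1 + d.1) (now.2 + d.2) "#",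
             q ++ [(now.1 + d.1, now.2 + d.2)], bl, wh, res + 1⟩ := by
          simp only [stepA]
          rw [if_pos (by omega), if_pos hv]
        obtain ⟨G, add', hB', hst', hd', hA'⟩ :=
          ih (setCell g (now.1 + d.1) (now.2 + d.2) "#")
            (q ++ [(now.1 + d.1, now.2 + d.2)]) bl wh (res + 1)
            (reg ++ [(now.1 + d.1, now.2 + d.2)])
        have hstep := stab_set hr.1 hr.2.2.1 hv
        refine ⟨G, (now.1 + d.1, now.2 + d.2) :: add', ?_, stab_trans hstep hst', ?_, ?_⟩
        · rw [hB, hB']; simp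
        · have := dots_set hr.1 hr.2.2.1 hv
          simp only [List.length_cons]; omega
        · intro gf hgf
          have hsharp : cellGet (setCell g (now.1 + d.1) (now.2 + d.2) "#")
              (now.1 + d.1) (now.2 + d.2) = "#" := cellGet_setCell_self hr.1 hr.2.2.1 hv "#"
          have hGv : cellGet gf (now.1 + d.1) (now.2 + d.2) = "#" := by
            rw [stab_val (stab_trans hst' hgf) (by rw [hsharp]; decide)]
            exact hsharp
          have hcol : colorUpd H W gf now (bl, wh) d = (bl, wh) := by
            simp only [colorUpd]
            rw [if_pos hr, hGv, if_neg (by decide), if_neg (by decide)]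
          rw [hA, hA' gf hgf, hcol]
          simp
          omega
      · -- neighbour is not '.', B's fill skips; A may set a colour flag
        have hB : stepB H W now ⟨g, q, reg⟩ d = ⟨g, q, reg⟩ := by
          simp only [stepB]
          rw [if_neg (fun hc => hv hc.2.2.2.2)]
        have key : ∀ bl' wh',
            stepA H W now ⟨g, q, bl, wh, res⟩ d = ⟨g, q, bl', wh', res⟩ →
            (∀ gf, cellGet gf (now.1 + d.1) (now.2 + d.2) = cellGet g (now.1 + d.1) (now.2 + d.2) →
              colorUpd H W gf now (bl, wh) d = (bl', wh')) →
            ∃ G add,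
              (List.foldl (stepB H W now) (stepB H W now ⟨g, q, reg⟩ d) ds = ⟨G, q ++ add, reg ++ add⟩) ∧
              stab g G ∧ dots G + add.length = dots g ∧
              ∀ gf, stab G gf →
                List.foldl (stepA H W now) (stepA H W now ⟨g, q, bl, wh, res⟩ d) ds =
                  ⟨G, q ++ add, (List.foldl (colorUpd H W gf now) (colorUpd H W gf now (bl, wh) d) ds).1,
                    (List.foldl (colorUpd H W gf now) (colorUpd H W gf now (bl, wh) d) ds).2,
                    res + add.length⟩ := by
          intro bl' wh' hA hcol
          obtain ⟨G, add', hB', hst', hd', hA'⟩ := ih g q bl' wh' res reg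
          refine ⟨G, add', by rw [hB]; exact hB', hst', hd', ?_⟩
          intro gf hgf
          rw [hcol gf (stab_val (stab_trans hst' hgf) hv), hA]
          exact hA' gf hgf
        by_cases hb : cellGet g (now.1 + d.1) (now.2 + d.2) = "B"
        · exact key true wh
            (by simp only [stepA]; rw [if_pos (by omega), if_neg hv, if_pos hb])
            (fun gf hgf => by simp only [colorUpd]; rw [if_pos hr, hgf, if_pos hb])
        · by_cases hw : cellGet g (now.1 + d.1) (now.2 + d.2) = "W"
          · exact key bl true
              (by simp only [stepA]; rw [if_pos (by omega), if_neg hv, if_neg hb, if_pos hw])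
              (fun gf hgf => by simp only [colorUpd]; rw [if_pos hr, hgf, if_neg hb, if_pos hw])
          · exact key bl wh
              (by simp only [stepA]; rw [if_pos (by omega), if_neg hv, if_neg hb, if_neg hw])
              (fun gf hgf => by simp only [colorUpd]; rw [if_pos hr, hgf, if_neg hb, if_neg hw])
    · -- out of range: everything skips
      have hB : stepB H W now ⟨g, q, reg⟩ d = ⟨g, q, reg⟩ := by
        simp only [stepB]
        rw [if_neg (fun hc => hr ⟨hc.1, hc.2.1, hc.2.2.1, hc.2.2.2.1⟩)]
      have hA : stepA H W now ⟨g, q, bl, wh, res⟩ d = ⟨g, q, bl, wh, res⟩ := by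
        simp only [stepA]
        rw [if_neg (by omega)]
      obtain ⟨G, add', hB', hst', hd', hA'⟩ := ih g q bl wh res reg
      refine ⟨G, add', by rw [hB]; exact hB', hst', hd', ?_⟩
      intro gf hgf
      have hcol : colorUpd H W gf now (bl, wh) d = (bl, wh) := by
        simp only [colorUpd]; rw [if_neg hr]
      rw [hcol, hA]
      exact hA' gf hgf

lemma loop_sync : ∀ (fuel : Nat) (H W : Int) (g : List (List String)) (q : List (Int × Int))
    (bl wh : Bool) (res : Int) (reg : List (Int × Int)),
    5 * dots g + q.length < fuel →
    stab g (loopB fuel H W ⟨g, q, reg⟩).1 ∧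
    ∃ add, (loopB fuel H W ⟨g, q, reg⟩).2 = reg ++ add ∧
      loopA fuel H W ⟨g, q, bl, wh, res⟩ =
        (((q ++ add).foldl (colorStep H W (loopB fuel H W ⟨g, q, reg⟩).1) (bl, wh)).1,
         ((q ++ add).foldl (colorStep H W (loopB fuel H W ⟨g, q, reg⟩).1) (bl, wh)).2,
         res + add.length) := by
  intro fuel
  induction fuel with
  | zero => intro H W g q bl wh res reg h; omega
  | succ f ihf =>
    intro H W g q bl wh res reg h
    cases q with
    | nil =>
      refine ⟨stab_refl g, [], by simp [loopB], by simp [loopA]⟩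
    | cons now rest =>
      have h1 : loopB (f + 1) H W ⟨g, now :: rest, reg⟩ =
          loopB f H W (dxy.foldl (stepB H W now) ⟨g, rest, reg⟩) := rfl
      have h2 : loopA (f + 1) H W ⟨g, now :: rest, bl, wh, res⟩ =
          loopA f H W (dxy.foldl (stepA H W now) ⟨g, rest, bl, wh, res⟩) := rfl
      obtain ⟨G, add1, hBf, hstgG, hdt, hAf⟩ := fold_sync H W now dxy g rest bl wh res reg
      have hm : 5 * dots G + (rest ++ add1).length < f := by
        simp only [List.length_cons] at h
        simp only [List.length_append]
        omega
      obtain ⟨hstabGgf, add2, hreg2, hA2⟩ :=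
        ihf H W G (rest ++ add1)
          (dxy.foldl (colorUpd H W (loopB f H W ⟨G, rest ++ add1, reg ++ add1⟩).1 now) (bl, wh)).1
          (dxy.foldl (colorUpd H W (loopB f H W ⟨G, rest ++ add1, reg ++ add1⟩).1 now) (bl, wh)).2
          (res + add1.length) (reg ++ add1) hm
      refine ⟨?_, add1 ++ add2, ?_, ?_⟩
      · rw [h1, hBf]
        exact stab_trans hstgG hstabGgf
      · rw [h1, hBf, hreg2]
        simp
      · rw [h2, hAf _ hstabGgf, hA2, h1, hBf]
        simp only [List.append_assoc, List.cons_append, List.foldl_cons]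
        have hcs : colorStep H W (loopB f H W ⟨G, rest ++ add1, reg ++ add1⟩).1 (bl, wh) now =
            ((dxy.foldl (colorUpd H W (loopB f H W ⟨G, rest ++ add1, reg ++ add1⟩).1 now) (bl, wh)).1,
             (dxy.foldl (colorUpd H W (loopB f H W ⟨G, rest ++ add1, reg ++ add1⟩).1 now) (bl, wh)).2) := by
          rw [colorStep]
        rw [← hcs]
        simp only [Prod.mk.injEq]
        refine ⟨trivial, trivial, ?_⟩
        simp only [List.length_append]
        push_cast
        ring

lemma which_eq (x y : Int) (map : List (List String)) : which x y map = which_alt x y map := by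
  unfold which which_alt
  by_cases h0 : cellGet map x y ≠ "."
  · rw [if_pos h0, if_pos h0]
  · rw [if_neg h0, if_neg h0]
    dsimp only
    have hm : 5 * dots (setCell map x y "#") +
        ([((x : Int), (y : Int))] : List (Int × Int)).length < 5 * (map.map List.length).sum + 2 := by
      have h1 := dots_le (setCell map x y "#")
      have h2 := totalLen_setCell map x y "#"
      simp only [List.length_cons, List.length_nil]
      omega
    obtain ⟨hst, add, hreg, hA⟩ := loop_sync (5 * (map.map List.length).sum + 2)
      (map.length : Int) ((map.headD []).length : Int) (setCell map x y "#")
      [(x, y)] false false 1 [(x, y)] hm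
    rw [hA, hreg]
    simp only [List.cons_append, List.nil_append, List.length_cons]
    by_cases hbw : (List.foldl
        (colorStep (map.length : Int) ((map.headD []).length : Int)
          (loopB (5 * (map.map List.length).sum + 2) (map.length : Int) ((map.headD []).length : Int)
            ⟨setCell map x y "#", [(x, y)], [(x, y)]⟩).1)
        (false, false) ((x, y) :: add)).1 ≠ (List.foldl
        (colorStep (map.length : Int) ((map.headD []).length : Int)
          (loopB (5 * (map.map List.length).sum + 2) (map.length : Int) ((map.headD []).length : Int)
            ⟨setCell map x y "#", [(x, y)], [(x, y)]⟩).1)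
        (false, false) ((x, y) :: add)).2
    · rw [if_pos hbw, if_pos hbw]
      simp only [Prod.mk.injEq]
      refine ⟨trivial, ?_⟩
      push_cast
      ring
    · rw [if_neg hbw, if_neg hbw]

-- ===== VERDICT (by name: the statement is the Claim_ definition above) =====
theorem which_spec : Claim_equal_which := by
  intro x y map _ _
  unfold Spec_which
  exact which_eq x y map
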